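-- pv_equiv track=rewrite | github.com/Ricky-Lopez-SS/Cohort-Assignments | Assignment 4/Assignment_4-1.py | func13
-- ===== SOURCE A (Python) =====
-- def func13(str):
--
--     ret_str = ''
--
--     for index in range(len(str)):
--         if index == 0 or index == 3:
--             ret_str += str[index].upper()
--             continue
--         ret_str += str[index]
--
--     return ret_str
-- ===== SOURCE B (Python) =====
-- def func13(str):
--     chars = list(str)
--     if len(chars) > 0:
--         chars[0] = chars[0].upper()
--     if len(chars) > 3:
--         chars[3] = chars[3].upper()
--     return ''.join(chars)
-- ===== Notes on version B (the rewrite author's own statement) =====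
-- stated objective: simpler
-- what changed: Replaces the per-character loop with repeated string concatenation by two guarded in-place edits at positions 0 and 3 on a char list followed by a single join.
import Mathlib
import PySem

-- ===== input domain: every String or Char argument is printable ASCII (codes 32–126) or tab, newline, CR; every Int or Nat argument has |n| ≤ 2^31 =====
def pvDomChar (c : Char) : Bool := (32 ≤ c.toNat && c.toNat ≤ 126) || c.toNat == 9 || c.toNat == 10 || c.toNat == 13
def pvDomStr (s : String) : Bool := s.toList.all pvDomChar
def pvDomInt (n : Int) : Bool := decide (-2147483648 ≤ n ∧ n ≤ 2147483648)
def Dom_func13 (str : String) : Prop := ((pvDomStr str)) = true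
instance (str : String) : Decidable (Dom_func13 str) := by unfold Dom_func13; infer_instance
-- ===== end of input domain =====

-- B replaces A's per-character building loop by two guarded in-place edits at positions 0 and 3 (simpler decomposition).

-- ===== PORT A =====
-- literal port: for index in range(len(str)): if index == 0 or index == 3: ret_str += str[index].upper() else: ret_str += str[index]
def func13 (str : String) : String :=
  String.mk ((List.range str.toList.length).foldl
    (fun ret index =>
      if index == 0 || index == 3 then ret ++ [PySem.Chars.upperChar str.toList[index]!]
      else ret ++ [str.toList[index]!]) [])

-- ===== PORT B =====
-- 'if len(chars) > i: chars[i] = chars[i].upper()'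
def editAtUpper (cs : List Char) (i : Nat) : List Char :=
  if cs.length > i then cs.set i (PySem.Chars.upperChar cs[i]!) else cs

def func13_alt (str : String) : String :=
  String.mk (editAtUpper (editAtUpper str.toList 0) 3)

-- ===== PRECONDITION & SPEC =====
def Spec_func13 (str : String) (out : String) : Prop := out = func13_alt str
instance (str : String) (out : String) : Decidable (Spec_func13 str out) := by unfold Spec_func13; infer_instance

-- ===== CLAIM (what is proved, stated in full; the proofs are below) =====
def Claim_equal_func13 : Prop := ∀ (str : String), Dom_func13 str → Spec_func13 str (func13 str)

-- ===== LEMMAS AND PROOFS =====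

theorem foldl_if_append_map (g h : Nat → Char) (p : Nat → Bool) :
    ∀ (l : List Nat) (init : List Char),
      l.foldl (fun ret i => if p i then ret ++ [g i] else ret ++ [h i]) init
        = init ++ l.map (fun i => if p i then g i else h i) := by
  intro l
  induction l with
  | nil => simp
  | cons a t ih =>
      intro init
      by_cases hp : p a <;> simp [List.foldl, hp, ih]

theorem map_getElem!_range :
    ∀ (l : List Char), (List.range l.length).map (fun i => l[i]!) = l := by
  intro l
  induction l with
  | nil => simp
  | cons a t ih =>
      rw [show (a :: t).length = t.length + 1 from rfl, List.range_succ_eq_map,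
        List.map_cons, List.map_map]
      congr 1

theorem list_eq (cs : List Char) :
    (List.range cs.length).foldl
      (fun ret index =>
        if index == 0 || index == 3 then ret ++ [PySem.Chars.upperChar cs[index]!]
        else ret ++ [cs[index]!]) []
      = editAtUpper (editAtUpper cs 0) 3 := by
  rw [foldl_if_append_map]
  match cs with
  | [] => simp [editAtUpper]
  | [a] => simp [editAtUpper, List.range_succ]
  | [a, b] => simp [editAtUpper, List.range_succ]
  | [a, b, c] => simp [editAtUpper, List.range_succ]
  | a :: b :: c :: d :: t =>
      have hlen : (a :: b :: c :: d :: t).length = 4 + t.length := by simp; omega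
      rw [hlen, List.range_add, List.map_append, List.map_map]
      have h4 : (List.range 4) = [0, 1, 2, 3] := by decide
      rw [h4]
      have htail : (List.map
          ((fun i => if i == 0 || i == 3
            then PySem.Chars.upperChar (a :: b :: c :: d :: t)[i]!
            else (a :: b :: c :: d :: t)[i]!) ∘ (fun x => 4 + x))
          (List.range t.length)) = t := by
        calc List.map
              ((fun i => if i == 0 || i == 3
                then PySem.Chars.upperChar (a :: b :: c :: d :: t)[i]!
                else (a :: b :: c :: d :: t)[i]!) ∘ (fun x => 4 + x))
              (List.range t.length)
            = (List.range t.length).map (fun i => t[i]!) := by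
              apply List.map_congr_left; intro i _
              simp only [Function.comp]
              rw [show (4 + i == 0 || 4 + i == 3) = false by simp; omega]
              simp [show 4 + i = i + 4 by omega]
          _ = t := map_getElem!_range t
      rw [htail]
      simp [editAtUpper, List.set]

-- ===== VERDICT (by name: the statement is the Claim_ definition above) =====
theorem func13_spec : Claim_equal_func13 := by
  intro str _
  unfold Spec_func13 func13 func13_alt
  exact congrArg String.mk (list_eq str.toList)
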